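-- pv_equiv track=rewrite | github.com/christofmuc/KnobKraft-orm | adaptations/Yamaha-YC-Series.py | splitSysexMessage
-- ===== SOURCE A (Python) =====
-- def splitSysexMessage(messages: list[int]) -> list[list[int]]:
--     """Extract SysEx Messsages from concatenated list
--
--     Example:
--
--     messages = [0xf0, 1, 2, 3, 0xf7,   0xf0, 4, 5, 0xf7]
--
--     returns  [ [0xf0, 1, 2, 3, 0xf7], [0xf0, 4, 5, 0xf7] ]
--
--     Args:
--         messages (list[int]): One or more SysEx messages concatenated.
--
--     Returns:
--         list[list[int]]: One or more SysEx messages split.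
--     """
--     result = []
--     start = 0
--     read = 0
--     while read < len(messages):
--         if messages[read] == 0xF0:
--             start = read
--         elif messages[read] == 0xF7:
--             result.append(messages[start : read + 1])
--         read = read + 1
--     return result
-- ===== SOURCE B (Python) =====
-- def splitSysexMessage(messages: list[int]) -> list[list[int]]:
--     result = []
--     current = []
--     for b in messages:
--         if b == 0xF0:
--             current = [b]
--         elif b == 0xF7:
--             current.append(b)
--             result.append(list(current))
--         else:
--             current.append(b)
--     return result
-- ===== Notes on version B (the rewrite author's own statement) =====
-- stated objective: simpler
-- what changed: Replaces A's index bookkeeping (start pointer plus list slicing on each 0xF7) by a single pass that grows an accumulator buffer per message, resetting the buffer to hold just the start byte on 0xF0 and emitting a copy of it on 0xF7; no indexing or slicing remains. (avoiding per-message slicing gives a measured constant-factor speedup)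
import Mathlib
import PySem

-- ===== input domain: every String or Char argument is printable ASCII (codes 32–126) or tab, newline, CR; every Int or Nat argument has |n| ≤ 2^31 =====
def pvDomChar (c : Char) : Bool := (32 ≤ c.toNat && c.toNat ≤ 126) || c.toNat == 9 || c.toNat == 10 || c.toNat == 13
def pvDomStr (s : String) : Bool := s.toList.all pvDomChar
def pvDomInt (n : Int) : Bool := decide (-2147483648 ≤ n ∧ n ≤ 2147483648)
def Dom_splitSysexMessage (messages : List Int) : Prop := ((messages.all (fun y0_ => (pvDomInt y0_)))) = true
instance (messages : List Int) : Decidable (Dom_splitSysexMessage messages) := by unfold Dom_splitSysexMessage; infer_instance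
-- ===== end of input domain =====

-- B replaces A's start-index-and-slice scan by a single pass that grows an accumulator buffer per message (objective: simpler, no indexing/slicing).

-- ===== PORT A =====
-- while read < len(messages): index with pyGet?, slice on 0xF7; fuel = remaining iterations
def splitAGo (messages : List Int) (fuel read start : Nat) (result : List (List Int)) : List (List Int) :=
  match fuel with
  | 0 => result
  | Nat.succ f =>
    match PySem.List.pyGet? messages (read : Int) with
    | none => result
    | some b =>
      if b = 0xF0 then splitAGo messages f (read + 1) read result
      else if b = 0xF7 then
        splitAGo messages f (read + 1) start
          (result ++ [PySem.List.slice messages (some (start : Int)) (some ((read : Int) + 1))])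
      else splitAGo messages f (read + 1) start result

def splitSysexMessage (messages : List Int) : List (List Int) :=
  splitAGo messages messages.length 0 0 []

-- ===== PORT B =====
def splitBGo (result : List (List Int)) (current : List Int) : List Int → List (List Int)
  | [] => result
  | b :: rest =>
    if b = 0xF0 then splitBGo result [b] rest
    else if b = 0xF7 then splitBGo (result ++ [current ++ [b]]) (current ++ [b]) rest
    else splitBGo result (current ++ [b]) rest

def splitSysexMessage_alt (messages : List Int) : List (List Int) :=
  splitBGo [] [] messages

-- ===== PRECONDITION & SPEC =====
def Spec_splitSysexMessage (messages : List Int) (out : List (List Int)) : Prop := out = splitSysexMessage_alt messages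
instance (messages : List Int) (out : List (List Int)) : Decidable (Spec_splitSysexMessage messages out) := by unfold Spec_splitSysexMessage; infer_instance

-- ===== CLAIM (what is proved, stated in full; the proofs are below) =====
def Claim_equal_splitSysexMessage : Prop := ∀ (messages : List Int), Dom_splitSysexMessage messages → Spec_splitSysexMessage messages (splitSysexMessage messages)

-- ===== LEMMAS AND PROOFS =====

-- the slice A takes on a 0xF7 byte is exactly B's accumulator (bytes since the last 0xF0, or from 0) plus that byte
lemma slice_step (pre rest : List Int) (b : Int) (start : Nat) (h : start ≤ pre.length) :
    PySem.List.slice (pre ++ b :: rest) (some (start : Int)) (some ((pre.length : Int) + 1))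
      = pre.drop start ++ [b] := by
  rw [PySem.List.slice_toNat]
  have h1 : ((pre.length : Int) + 1).toNat = pre.length + 1 := by omega
  have h2 : ((start : Int)).toNat = start := by omega
  rw [h1, h2, List.drop_append_of_le_length h]
  have h3 : pre.length + 1 - start = (pre.drop start).length + 1 := by
    simp [List.length_drop]; omega
  rw [h3, List.take_append]
  · simp
  · positivity
  · positivity

-- invariant: the A-loop at position pre.length with start index `start` equals the B-fold with buffer pre.drop start
lemma go_eq (rest : List Int) : ∀ (pre : List Int) (start : Nat) (result : List (List Int)),
    start ≤ pre.length →
    splitAGo (pre ++ rest) rest.length pre.length start result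
      = splitBGo result (pre.drop start) rest := by
  induction rest with
  | nil => intro pre start result h; simp [splitAGo, splitBGo]
  | cons b rest ih =>
    intro pre start result h
    have hget : PySem.List.pyGet? (pre ++ b :: rest) ((pre.length : Nat) : Int) = some b := by
      rw [PySem.List.pyGet?_natCast]
      simp
    rw [List.length_cons]
    rw [show splitAGo (pre ++ b :: rest) (rest.length + 1) pre.length start result =
        (match PySem.List.pyGet? (pre ++ b :: rest) ((pre.length : Nat) : Int) with
          | none => result
          | some b' =>
            if b' = 0xF0 then splitAGo (pre ++ b :: rest) rest.length (pre.length + 1) pre.length result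
            else if b' = 0xF7 then
              splitAGo (pre ++ b :: rest) rest.length (pre.length + 1) start
                (result ++ [PySem.List.slice (pre ++ b :: rest) (some (start : Int)) (some ((pre.length : Int) + 1))])
            else splitAGo (pre ++ b :: rest) rest.length (pre.length + 1) start result)
      from rfl, hget]
    dsimp only
    have hassoc : pre ++ b :: rest = (pre ++ [b]) ++ rest := by simp
    have hlen : pre.length + 1 = (pre ++ [b]).length := by simp
    by_cases h0 : b = 0xF0
    · rw [if_pos h0, hassoc, hlen, ih (pre ++ [b]) pre.length result (by simp)]
      simp [splitBGo, h0, List.drop_append_of_le_length (le_refl pre.length)]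
    · by_cases h7 : b = 0xF7
      · rw [if_neg h0, if_pos h7, slice_step pre rest b start h, hassoc, hlen,
          ih (pre ++ [b]) start _ (by simp; omega)]
        simp [splitBGo, h7, List.drop_append_of_le_length h]
      · rw [if_neg h0, if_neg h7, hassoc, hlen, ih (pre ++ [b]) start result (by simp; omega)]
        simp [splitBGo, h0, h7, List.drop_append_of_le_length h]

-- ===== VERDICT (by name: the statement is the Claim_ definition above) =====
theorem splitSysexMessage_spec : Claim_equal_splitSysexMessage := by
  intro messages _
  unfold Spec_splitSysexMessage splitSysexMessage splitSysexMessage_alt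
  have := go_eq messages [] 0 [] (by simp)
  simpa using this
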